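-- pv_equiv track=rewrite | github.com/ikokkari/PythonProblems | labs109.py | reversenacci
-- ===== SOURCE A (Python) =====
-- def reversenacci(i, n):
--     m = n - 1
--     while 2*m > n:
--         a, b = m, n
--         for j in range(i-1):
--             c = b - a
--             if c < 1 or c > a:
--                 break
--             a, b = c, a
--         else:
--             return True
--         m = m - 1
--     return False
-- ===== SOURCE B (Python) =====
-- def reversenacci(i, n):
--     # Express the backward chain x_0=n, x_1=m, x_{k+1}=x_{k-1}-x_k as x_k = p*n + q*m
--     # and intersect the interval constraints on m instead of trying every m.
--     lo, hi = n // 2 + 1, n - 1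
--     p1, q1, p2, q2 = 0, 1, 1, -1   # coefficients of x_{k-1} and x_k
--     k = 2
--     while k <= i:
--         if lo > hi:
--             return False
--         # constraint x_k >= 1, i.e. p2*n + q2*m >= 1
--         if q2 < 0:
--             hi = min(hi, (p2 * n - 1) // (-q2))
--         else:
--             lo = max(lo, -((p2 * n - 1) // q2))
--         p1, q1, p2, q2 = p2, q2, p1 - p2, q1 - q2
--         k += 1
--     if i >= 2:
--         # constraint x_{i+1} >= 0, i.e. p2*n + q2*m >= 0
--         if q2 < 0:
--             hi = min(hi, (p2 * n) // (-q2))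
--         else:
--             lo = max(lo, -((p2 * n) // q2))
--     return lo <= hi
-- ===== Notes on version B (the rewrite author's own statement) =====
-- stated objective: faster
-- what changed: Instead of trying every candidate m below n and re-running the backward chain (O(n*i)), B writes each chain term as a linear function p*n+q*m with signed Fibonacci coefficients and intersects the O(min(i,log n)) resulting interval constraints on m, answering whether the interval is nonempty.
import Mathlib
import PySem

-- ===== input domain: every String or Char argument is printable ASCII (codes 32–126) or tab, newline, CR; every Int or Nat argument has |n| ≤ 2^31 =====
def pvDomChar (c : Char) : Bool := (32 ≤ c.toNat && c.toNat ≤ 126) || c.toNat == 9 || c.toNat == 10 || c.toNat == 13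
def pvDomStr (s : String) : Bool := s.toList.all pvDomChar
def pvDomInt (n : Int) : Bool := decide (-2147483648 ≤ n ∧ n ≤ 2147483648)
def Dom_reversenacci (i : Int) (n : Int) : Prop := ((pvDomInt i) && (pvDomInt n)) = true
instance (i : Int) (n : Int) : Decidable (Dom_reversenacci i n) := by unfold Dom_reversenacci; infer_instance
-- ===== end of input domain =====

-- B replaces A's scan over all m with 2*m > n by intersecting O(min(i, log n)) linear
-- interval constraints on m (each chain term is p*n + q*m with signed Fibonacci coefficients).

-- ===== PORT A =====
-- the inner `for j in range(i-1)` loop; returns true iff it completes (the `else` branch fires)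
def aInner : Nat → Int → Int → Bool
  | 0, _, _ => true
  | t + 1, a, b =>
    let c := b - a
    if c < 1 ∨ c > a then false else aInner t c a

-- the outer `while 2*m > n` loop, scanning m downward
def aOuter (i n m : Int) : Bool :=
  if h : 2 * m > n then
    if aInner (i - 1).toNat m n then true else aOuter i n (m - 1)
  else false
termination_by (2 * m - n).toNat
decreasing_by omega

def reversenacci (i : Int) (n : Int) : Bool := aOuter i n (n - 1)

-- ===== PORT B =====
-- the `while k <= i` loop of Source B; state (lo, hi, p1, q1, p2, q2); `none` = early `return False`
def bLoop (n : Int) : Nat → Int → Int → Int → Int → Int → Int →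
    Option (Int × Int × Int × Int × Int × Int)
  | 0, lo, hi, p1, q1, p2, q2 => some (lo, hi, p1, q1, p2, q2)
  | t + 1, lo, hi, p1, q1, p2, q2 =>
    if lo > hi then none
    else if q2 < 0 then
      bLoop n t lo (min hi (PySem.Int.floordiv (p2 * n - 1) (-q2))) p2 q2 (p1 - p2) (q1 - q2)
    else
      bLoop n t (max lo (-(PySem.Int.floordiv (p2 * n - 1) q2))) hi p2 q2 (p1 - p2) (q1 - q2)

def reversenacci_alt (i : Int) (n : Int) : Bool :=
  match bLoop n (i - 1).toNat (PySem.Int.floordiv n 2 + 1) (n - 1) 0 1 1 (-1) with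
  | none => false
  | some (lo, hi, _, _, p2, q2) =>
    if 2 ≤ i then
      if q2 < 0 then decide (lo ≤ min hi (PySem.Int.floordiv (p2 * n) (-q2)))
      else decide (max lo (-(PySem.Int.floordiv (p2 * n) q2)) ≤ hi)
    else decide (lo ≤ hi)

-- ===== PRECONDITION & SPEC =====
def Spec_reversenacci (i : Int) (n : Int) (out : Bool) : Prop := out = reversenacci_alt i n
instance (i : Int) (n : Int) (out : Bool) : Decidable (Spec_reversenacci i n out) := by unfold Spec_reversenacci; infer_instance

-- ===== CLAIM (what is proved, stated in full; the proofs are below) =====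
def Claim_equal_reversenacci : Prop := ∀ (i : Int) (n : Int), Dom_reversenacci i n → Spec_reversenacci i n (reversenacci i n)

-- ===== LEMMAS AND PROOFS =====

-- the backward chain: X n m 0 = n, X n m 1 = m, X n m (k+2) = X n m k - X n m (k+1)
def X (n m : Int) : Nat → Int
  | 0 => n
  | 1 => m
  | k + 2 => X n m k - X n m (k + 1)

-- coefficient sequences: X n m k = P k * n + Q k * m
def P : Nat → Int
  | 0 => 1
  | 1 => 0
  | k + 2 => P k - P (k + 1)

def Q : Nat → Int
  | 0 => 0
  | 1 => 1
  | k + 2 => Q k - Q (k + 1)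

lemma X_lin (n m : Int) : ∀ k, X n m k = P k * n + Q k * m := by
  have h : ∀ k, X n m k = P k * n + Q k * m ∧ X n m (k+1) = P (k+1) * n + Q (k+1) * m := by
    intro k
    induction k with
    | zero => simp [X, P, Q]
    | succ k ih => exact ⟨ih.2, by simp only [X, P, Q]; rw [ih.1, ih.2]; ring⟩
  exact fun k => (h k).1

lemma Q_sign : ∀ j : Nat, 1 ≤ Q (2*j+1) ∧ Q (2*j+2) ≤ -1 := by
  intro j
  induction j with
  | zero => simp [Q]
  | succ j ih =>
    have h3 : Q (2*j+3) = Q (2*j+1) - Q (2*j+2) := by simp [Q]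
    have h4 : Q (2*j+4) = Q (2*j+2) - Q (2*j+3) := by simp [Q]
    constructor
    · show 1 ≤ Q (2*(j+1)+1)
      have : 2*(j+1)+1 = 2*j+3 := by omega
      rw [this, h3]; omega
    · show Q (2*(j+1)+2) ≤ -1
      have : 2*(j+1)+2 = 2*j+4 := by omega
      rw [this, h4, h3]; omega

lemma Q_ne_zero (k : Nat) (hk : 1 ≤ k) : Q k ≠ 0 := by
  rcases Nat.even_or_odd k with ⟨j, hj⟩ | ⟨j, hj⟩
  · have hj' : k = 2*(j-1)+2 := by omega
    have := (Q_sign (j-1)).2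
    rw [hj']; omega
  · have hj' : k = 2*j+1 := by omega
    have := (Q_sign j).1
    rw [hj']; omega

-- interval form of one linear constraint, negative coefficient
lemma con_neg {p q n c m : Int} (hq : q < 0) :
    c ≤ p * n + q * m ↔ m ≤ PySem.Int.floordiv (p * n - c) (-q) := by
  rw [PySem.Int.floordiv_eq_ediv_of_pos (by omega)]
  rw [Int.le_ediv_iff_mul_le (by omega : (0:Int) < -q)]
  constructor <;> intro h <;> nlinarith

-- interval form of one linear constraint, positive coefficient
lemma con_pos {p q n c m : Int} (hq : 0 < q) :
    c ≤ p * n + q * m ↔ -(PySem.Int.floordiv (p * n - c) q) ≤ m := by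
  rw [PySem.Int.floordiv_eq_ediv_of_pos hq, neg_le, Int.le_ediv_iff_mul_le hq]
  constructor <;> intro h <;> nlinarith

-- characterization of bLoop starting at constraint index k
lemma bLoop_spec (n : Int) (t : Nat) : ∀ (k : Nat) (lo hi : Int), 2 ≤ k →
    (match bLoop n t lo hi (P (k-1)) (Q (k-1)) (P k) (Q k) with
     | none => ∀ m, lo ≤ m → m ≤ hi → ¬ (∀ j, k ≤ j → j < k + t → 1 ≤ P j * n + Q j * m)
     | some (lo', hi', p1', q1', p2', q2') =>
       p1' = P (k+t-1) ∧ q1' = Q (k+t-1) ∧ p2' = P (k+t) ∧ q2' = Q (k+t) ∧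
       ∀ m, (lo' ≤ m ∧ m ≤ hi') ↔
         (lo ≤ m ∧ m ≤ hi ∧ ∀ j, k ≤ j → j < k + t → 1 ≤ P j * n + Q j * m)) := by
  induction t with
  | zero =>
    intro k lo hi hk
    simp only [bLoop]
    refine ⟨rfl, rfl, rfl, rfl, fun m => ?_⟩
    constructor
    · rintro ⟨h1, h2⟩; exact ⟨h1, h2, fun j hj1 hj2 => by omega⟩
    · rintro ⟨h1, h2, _⟩; exact ⟨h1, h2⟩
  | succ t ih =>
    intro k lo hi hk
    obtain ⟨j, rfl⟩ : ∃ j, k = j + 2 := ⟨k - 2, by omega⟩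
    simp only [bLoop]
    by_cases hlohi : lo > hi
    · simp only [if_pos hlohi]
      intro m h1 h2 _; omega
    · simp only [if_neg hlohi]
      have hP : P (j+2-1) - P (j+2) = P (j+3) := by
        have : P (j+3) = P (j+1) - P (j+2) := by simp [P]
        simp only [show j+2-1 = j+1 from rfl, this]
      have hQ : Q (j+2-1) - Q (j+2) = Q (j+3) := by
        have : Q (j+3) = Q (j+1) - Q (j+2) := by simp [Q]
        simp only [show j+2-1 = j+1 from rfl, this]
      have hidx : j + 3 - 1 = j + 2 := rfl
      by_cases hq : Q (j+2) < 0
      · simp only [if_pos hq, hP, hQ]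
        have hrec := ih (j+3) lo (min hi (PySem.Int.floordiv (P (j+2) * n - 1) (-Q (j+2)))) (by omega)
        rw [hidx] at hrec
        cases hres : bLoop n t lo (min hi (PySem.Int.floordiv (P (j+2) * n - 1) (-Q (j+2)))) (P (j+2)) (Q (j+2)) (P (j+3)) (Q (j+3)) with
        | none =>
          rw [hres] at hrec
          intro m h1 h2 hall
          have hcon : 1 ≤ P (j+2) * n + Q (j+2) * m := hall (j+2) (by omega) (by omega)
          refine hrec m h1 (le_min h2 ((con_neg hq).mp hcon)) (fun j' hj1 hj2 => hall j' (by omega) (by omega))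
        | some st =>
          rw [hres] at hrec
          obtain ⟨lo', hi', p1', q1', p2', q2'⟩ := st
          obtain ⟨e1, e2, e3, e4, hiff⟩ := hrec
          have hadd : j + 3 + t = j + 2 + (t+1) := by omega
          refine ⟨by rw [e1]; congr 1; omega, by rw [e2]; congr 1; omega,
                  by rw [e3, hadd], by rw [e4, hadd], fun m => ?_⟩
          rw [hiff m]
          constructor
          · rintro ⟨h1, h2, h3⟩
            refine ⟨h1, le_trans h2 (min_le_left _ _), fun j' hj1 hj2 => ?_⟩
            rcases Nat.eq_or_lt_of_le hj1 with heq | hlt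
            · rw [← heq]; exact (con_neg hq).mpr (le_trans h2 (min_le_right _ _))
            · exact h3 j' (by omega) (by omega)
          · rintro ⟨h1, h2, h3⟩
            have hcon : 1 ≤ P (j+2) * n + Q (j+2) * m := h3 (j+2) (by omega) (by omega)
            exact ⟨h1, le_min h2 ((con_neg hq).mp hcon), fun j' hj1 hj2 => h3 j' (by omega) (by omega)⟩
      · simp only [if_neg hq, hP, hQ]
        have hq' : 0 < Q (j+2) := by
          have := Q_ne_zero (j+2) (by omega); omega
        have hrec := ih (j+3) (max lo (-(PySem.Int.floordiv (P (j+2) * n - 1) (Q (j+2))))) hi (by omega)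
        rw [hidx] at hrec
        cases hres : bLoop n t (max lo (-(PySem.Int.floordiv (P (j+2) * n - 1) (Q (j+2))))) hi (P (j+2)) (Q (j+2)) (P (j+3)) (Q (j+3)) with
        | none =>
          rw [hres] at hrec
          intro m h1 h2 hall
          have hcon : 1 ≤ P (j+2) * n + Q (j+2) * m := hall (j+2) (by omega) (by omega)
          refine hrec m (max_le h1 ((con_pos hq').mp hcon)) h2 (fun j' hj1 hj2 => hall j' (by omega) (by omega))
        | some st =>
          rw [hres] at hrec
          obtain ⟨lo', hi', p1', q1', p2', q2'⟩ := st
          obtain ⟨e1, e2, e3, e4, hiff⟩ := hrec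
          have hadd : j + 3 + t = j + 2 + (t+1) := by omega
          refine ⟨by rw [e1]; congr 1; omega, by rw [e2]; congr 1; omega,
                  by rw [e3, hadd], by rw [e4, hadd], fun m => ?_⟩
          rw [hiff m]
          constructor
          · rintro ⟨h1, h2, h3⟩
            refine ⟨le_trans (le_max_left _ _) h1, h2, fun j' hj1 hj2 => ?_⟩
            rcases Nat.eq_or_lt_of_le hj1 with heq | hlt
            · rw [← heq]; exact (con_pos hq').mpr (le_trans (le_max_right _ _) h1)
            · exact h3 j' (by omega) (by omega)
          · rintro ⟨h1, h2, h3⟩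
            have hcon : 1 ≤ P (j+2) * n + Q (j+2) * m := h3 (j+2) (by omega) (by omega)
            exact ⟨max_le h1 ((con_pos hq').mp hcon), h2, fun j' hj1 hj2 => h3 j' (by omega) (by omega)⟩

-- A's inner loop completes iff the next t chain steps are valid
lemma aInner_iff (n m : Int) : ∀ (t j : Nat),
    (aInner t (X n m (j+1)) (X n m j) = true ↔
     ∀ s, s < t → 1 ≤ X n m (j+2+s) ∧ X n m (j+2+s) ≤ X n m (j+1+s)) := by
  intro t
  induction t with
  | zero => intro j; simp [aInner]
  | succ t ih =>
    intro j
    have hc : X n m j - X n m (j+1) = X n m (j+2) := by simp [X]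
    simp only [aInner, hc]
    by_cases hbad : X n m (j+2) < 1 ∨ X n m (j+2) > X n m (j+1)
    · simp only [if_pos hbad]
      constructor
      · intro h; exact absurd h (by simp)
      · intro h
        have := h 0 (by omega)
        simp only [Nat.add_zero] at this
        omega
    · simp only [if_neg hbad]
      rw [ih (j+1)]
      simp only [not_or, not_lt] at hbad
      constructor
      · intro h s hs
        rcases Nat.eq_zero_or_pos s with rfl | hpos
        · simpa using ⟨by omega, by omega⟩
        · have := h (s-1) (by omega)
          have e1 : j+1+2+(s-1) = j+2+s := by omega
          have e2 : j+1+1+(s-1) = j+1+s := by omega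
          rw [e1, e2] at this; exact this
      · intro h s hs
        have := h (s+1) (by omega)
        have e1 : j+2+(s+1) = j+1+2+s := by omega
        have e2 : j+1+(s+1) = j+1+1+s := by omega
        rw [e1, e2] at this; exact this

-- A's outer loop from start value m
lemma aOuter_iff (i n : Int) : ∀ m : Int, (aOuter i n m = true ↔
    ∃ m', m' ≤ m ∧ n < 2 * m' ∧ aInner (i-1).toNat m' n = true) := by
  intro m
  induction m using aOuter.induct i n with
  | case1 m h hInner =>
    rw [aOuter, dif_pos h, if_pos hInner]
    constructor
    · intro _; exact ⟨m, le_refl m, by omega, hInner⟩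
    · intro _; rfl
  | case2 m h hInner ih =>
    rw [aOuter, dif_pos h, if_neg hInner, ih]
    constructor
    · rintro ⟨m', h1, h2, h3⟩; exact ⟨m', by omega, h2, h3⟩
    · rintro ⟨m', h1, h2, h3⟩
      refine ⟨m', ?_, h2, h3⟩
      rcases eq_or_lt_of_le h1 with rfl | hlt
      · rw [h3] at hInner; exact absurd hInner (by simp)
      · omega
  | case3 m h =>
    rw [aOuter, dif_neg h]
    constructor
    · intro hf; exact absurd hf (by simp)
    · rintro ⟨m', h1, h2, _⟩; omega

-- pairwise chain conditions ⟺ positivity conditions plus one tail sign condition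
lemma chain_iff (n m : Int) (t : Nat) :
    (∀ s, s < t → 1 ≤ X n m (2+s) ∧ X n m (2+s) ≤ X n m (1+s)) ↔
    ((∀ s, s < t → 1 ≤ X n m (2+s)) ∧ (0 < t → 0 ≤ X n m (2+t))) := by
  have hrec : ∀ s : Nat, X n m (3+s) = X n m (1+s) - X n m (2+s) := by
    intro s
    have : X n m (s+3) = X n m (s+1) - X n m (s+2) := by simp [X]
    simpa [Nat.add_comm] using this
  constructor
  · intro h
    refine ⟨fun s hs => (h s hs).1, fun ht => ?_⟩
    have hA := (h (t-1) (by omega)).2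
    have hr := hrec (t-1)
    rw [show 3 + (t-1) = 2 + t by omega] at hr
    omega
  · rintro ⟨h1, h2⟩ s hs
    refine ⟨h1 s hs, ?_⟩
    have hr := hrec s
    by_cases hlast : s + 1 < t
    · have := h1 (s+1) hlast
      have e : 2 + (s+1) = 3 + s := by omega
      rw [e] at this
      omega
    · have hst : s = t - 1 := by omega
      have := h2 (by omega)
      have e : 2 + t = 3 + s := by omega
      rw [e] at this
      omega

-- A returns true iff some m in range satisfies positivity plus the tail condition
lemma a_iff (i n : Int) : reversenacci i n = true ↔
    ∃ m, n < 2*m ∧ m ≤ n - 1 ∧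
      (∀ s, s < (i-1).toNat → 1 ≤ X n m (2+s)) ∧
      (0 < (i-1).toNat → 0 ≤ X n m (2 + (i-1).toNat)) := by
  unfold reversenacci
  rw [aOuter_iff]
  constructor
  · rintro ⟨m', h1, h2, h3⟩
    have h3' : aInner (i-1).toNat (X n m' 1) (X n m' 0) = true := h3
    have := (chain_iff n m' (i-1).toNat).mp ((aInner_iff n m' (i-1).toNat 0).mp h3')
    exact ⟨m', h2, h1, this.1, this.2⟩
  · rintro ⟨m, h1, h2, h3, h4⟩
    refine ⟨m, h2, h1, ?_⟩
    exact (aInner_iff n m (i-1).toNat 0).mpr ((chain_iff n m (i-1).toNat).mpr ⟨h3, h4⟩)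

-- B returns true iff some m in range satisfies all the linear constraints
lemma alt_iff (i n : Int) : reversenacci_alt i n = true ↔
    ∃ m, PySem.Int.floordiv n 2 + 1 ≤ m ∧ m ≤ n - 1 ∧
      (∀ j, 2 ≤ j → j < 2 + (i-1).toNat → 1 ≤ P j * n + Q j * m) ∧
      (2 ≤ i → 0 ≤ P (2 + (i-1).toNat) * n + Q (2 + (i-1).toNat) * m) := by
  unfold reversenacci_alt
  have hspec := bLoop_spec n (i-1).toNat 2 (PySem.Int.floordiv n 2 + 1) (n - 1) (by omega)
  have eP1 : P (2-1) = 0 := by norm_num [P]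
  have eQ1 : Q (2-1) = 1 := by norm_num [Q]
  have eP2 : P 2 = 1 := by norm_num [P]
  have eQ2 : Q 2 = -1 := by norm_num [Q]
  rw [eP1, eQ1, eP2, eQ2] at hspec
  cases hres : bLoop n (i - 1).toNat (PySem.Int.floordiv n 2 + 1) (n - 1) 0 1 1 (-1) with
  | none =>
    rw [hres] at hspec
    constructor
    · intro h; exact absurd h (by simp)
    · rintro ⟨m, h1, h2, h3, _⟩; exact absurd h3 (hspec m h1 h2)
  | some st =>
    obtain ⟨lo, hi, p1, q1, p2, q2⟩ := st
    rw [hres] at hspec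
    obtain ⟨e1, e2, e3, e4, hiff⟩ := hspec
    subst e3; subst e4
    show (if 2 ≤ i then
        if Q (2 + (i-1).toNat) < 0 then
          decide (lo ≤ min hi (PySem.Int.floordiv (P (2 + (i-1).toNat) * n) (-Q (2 + (i-1).toNat))))
        else decide (max lo (-(PySem.Int.floordiv (P (2 + (i-1).toNat) * n) (Q (2 + (i-1).toNat)))) ≤ hi)
      else decide (lo ≤ hi)) = true ↔ _
    by_cases h2i : 2 ≤ i
    · rw [if_pos h2i]
      by_cases hq : Q (2 + (i-1).toNat) < 0
      · rw [if_pos hq, decide_eq_true_iff]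
        constructor
        · intro h
          have hm := (hiff lo).mp ⟨le_refl lo, le_trans h (min_le_left _ _)⟩
          refine ⟨lo, hm.1, hm.2.1, hm.2.2, fun _ => ?_⟩
          have hD : lo ≤ PySem.Int.floordiv (P (2+(i-1).toNat) * n) (-Q (2+(i-1).toNat)) :=
            le_trans h (min_le_right _ _)
          have := (con_neg (c := (0:Int)) hq).mpr (by simpa using hD)
          simpa using this
        · rintro ⟨m, h1, h2, h3, h4⟩
          have hm := (hiff m).mpr ⟨h1, h2, h3⟩
          have hD : m ≤ PySem.Int.floordiv (P (2+(i-1).toNat) * n - 0) (-Q (2+(i-1).toNat)) :=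
            (con_neg hq).mp (by simpa using h4 h2i)
          exact le_trans hm.1 (le_min hm.2 (by simpa using hD))
      · rw [if_neg hq, decide_eq_true_iff]
        have hq' : 0 < Q (2+(i-1).toNat) := by
          have := Q_ne_zero (2+(i-1).toNat) (by omega); omega
        constructor
        · intro h
          have hm := (hiff hi).mp ⟨le_trans (le_max_left _ _) h, le_refl hi⟩
          refine ⟨hi, hm.1, hm.2.1, hm.2.2, fun _ => ?_⟩
          have hD : -(PySem.Int.floordiv (P (2+(i-1).toNat) * n) (Q (2+(i-1).toNat))) ≤ hi :=
            le_trans (le_max_right _ _) h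
          have := (con_pos (c := (0:Int)) hq').mpr (by simpa using hD)
          simpa using this
        · rintro ⟨m, h1, h2, h3, h4⟩
          have hm := (hiff m).mpr ⟨h1, h2, h3⟩
          have hD := (con_pos hq').mp (show (0:Int) ≤ _ by simpa using h4 h2i)
          exact max_le (le_trans hm.1 hm.2) (le_trans (by simpa using hD) hm.2)
    · rw [if_neg h2i, decide_eq_true_iff]
      constructor
      · intro h
        have hm := (hiff lo).mp ⟨le_refl lo, h⟩
        exact ⟨lo, hm.1, hm.2.1, hm.2.2, fun hc => absurd hc h2i⟩
      · rintro ⟨m, h1, h2, h3, _⟩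
        have hm := (hiff m).mpr ⟨h1, h2, h3⟩
        exact le_trans hm.1 hm.2

-- ===== VERDICT (by name: the statement is the Claim_ definition above) =====
theorem reversenacci_spec : Claim_equal_reversenacci := by
  intro i n _
  show reversenacci i n = reversenacci_alt i n
  rw [Bool.eq_iff_iff, a_iff, alt_iff]
  apply exists_congr
  intro m
  have hrange : n < 2*m ↔ PySem.Int.floordiv n 2 + 1 ≤ m := by
    have hb : PySem.Int.floordiv n 2 < m ↔ n < m * 2 :=
      PySem.Int.floordiv_lt_iff_lt_mul (by norm_num)
    constructor
    · intro h; have := hb.mpr (by omega); omega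
    · intro h; have := hb.mp (by omega); omega
  have hforall : (∀ s, s < (i-1).toNat → 1 ≤ X n m (2+s)) ↔
      (∀ j, 2 ≤ j → j < 2 + (i-1).toNat → 1 ≤ P j * n + Q j * m) := by
    constructor
    · intro h j hj1 hj2
      have := h (j-2) (by omega)
      rw [X_lin, show 2+(j-2) = j by omega] at this
      exact this
    · intro h s hs
      rw [X_lin]
      exact h (2+s) (by omega) (by omega)
  have htail : (0 < (i-1).toNat → 0 ≤ X n m (2 + (i-1).toNat)) ↔
      (2 ≤ i → 0 ≤ P (2 + (i-1).toNat) * n + Q (2 + (i-1).toNat) * m) := by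
    rw [X_lin n m (2 + (i-1).toNat)]
    constructor
    · intro h h2i; exact h (by omega)
    · intro h ht; exact h (by omega)
  exact and_congr hrange (and_congr Iff.rfl (and_congr hforall htail))
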